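-- pv_equiv track=rewrite | github.com/kelvinhuang0327/number-pattern-research | tools/backtest_biglotto_enhancements.py | markov_orthogonal_bet
-- ===== SOURCE A (Python) =====
-- from collections import Counter, defaultdict
--
-- MAX_NUM = 49
--
-- PICK = 6
--
-- def markov_orthogonal_bet(history, exclude=None, markov_window=30):
--     exclude = exclude or set()
--     window = min(markov_window, len(history))
--     recent = history[-window:]
--     transitions = Counter()
--     for i in range(len(recent) - 1):
--         prev_nums = recent[i]['numbers']
--         next_nums = recent[i + 1]['numbers']
--         for p in prev_nums:
--             for n in next_nums:
--                 transitions[(p, n)] += 1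
--     if len(history) < 2:
--         candidates = [n for n in range(1, MAX_NUM + 1) if n not in exclude]
--         return sorted(candidates[:PICK])
--     last_draw_nums = history[-1]['numbers']
--     scores = Counter()
--     for prev_num in last_draw_nums:
--         for n in range(1, MAX_NUM + 1):
--             scores[n] += transitions.get((prev_num, n), 0)
--     candidates = [(n, scores[n]) for n in range(1, MAX_NUM + 1) if n not in exclude]
--     candidates.sort(key=lambda x: -x[1])
--     selected = [n for n, _ in candidates[:PICK]]
--     if len(selected) < PICK:
--         remaining = [n for n in range(1, MAX_NUM + 1)
--                      if n not in exclude and n not in selected]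
--         selected.extend(remaining[:PICK - len(selected)])
--     return sorted(selected[:PICK])
-- ===== SOURCE B (Python) =====
-- from collections import Counter
--
-- MAX_NUM = 49
-- PICK = 6
--
-- def markov_orthogonal_bet(history, exclude=None, markov_window=30):
--     exclude = exclude or set()
--     if len(history) < 2:
--         candidates = [n for n in range(1, MAX_NUM + 1) if n not in exclude]
--         return sorted(candidates[:PICK])
--     window = min(markov_window, len(history))
--     recent = history[-window:]
--     last_counts = Counter(history[-1]['numbers'])
--     scores = Counter()
--     for i in range(len(recent) - 1):
--         overlap = sum(last_counts[p] for p in recent[i]['numbers'])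
--         for n in recent[i + 1]['numbers']:
--             scores[n] += overlap
--     candidates = [(n, scores[n]) for n in range(1, MAX_NUM + 1) if n not in exclude]
--     candidates.sort(key=lambda x: -x[1])
--     selected = [n for n, _ in candidates[:PICK]]
--     if len(selected) < PICK:
--         remaining = [n for n in range(1, MAX_NUM + 1)
--                      if n not in exclude and n not in selected]
--         selected.extend(remaining[:PICK - len(selected)])
--     return sorted(selected[:PICK])
-- ===== Notes on version B (the rewrite author's own statement) =====
-- stated objective: faster
-- what changed: B skips A's (prev,next)->count transition Counter and A's 49-wide per-number scoring loop: a single pass over consecutive window pairs computes each earlier draw's multiplicity-weighted overlap with the last draw (via one Counter of the last draw) and adds that overlap to the score of every number of the following draw.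
import Mathlib
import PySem

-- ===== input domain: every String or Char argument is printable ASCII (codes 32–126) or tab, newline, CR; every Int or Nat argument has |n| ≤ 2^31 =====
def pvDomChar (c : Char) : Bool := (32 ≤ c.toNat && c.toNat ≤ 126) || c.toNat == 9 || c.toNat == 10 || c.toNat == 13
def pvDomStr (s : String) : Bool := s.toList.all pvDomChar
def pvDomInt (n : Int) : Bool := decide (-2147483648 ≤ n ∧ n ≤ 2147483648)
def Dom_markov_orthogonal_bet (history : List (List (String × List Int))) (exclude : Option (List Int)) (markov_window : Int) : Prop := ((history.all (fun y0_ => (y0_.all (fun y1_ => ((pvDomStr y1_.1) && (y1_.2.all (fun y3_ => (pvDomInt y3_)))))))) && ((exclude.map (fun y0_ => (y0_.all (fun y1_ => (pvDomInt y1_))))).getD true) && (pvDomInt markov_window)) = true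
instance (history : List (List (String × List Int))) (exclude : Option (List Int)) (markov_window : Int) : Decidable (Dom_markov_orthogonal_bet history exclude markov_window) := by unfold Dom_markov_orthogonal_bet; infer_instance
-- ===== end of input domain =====

-- B replaces A's 49-wide (prev,next) transition Counter with a single pass over consecutive
-- draw pairs accumulating overlap-weighted scores (objective: faster, constant-factor).

-- d['numbers'] on a draw given as an association list (total form; Pre_ guarantees the key is present)
def pvNums (d : List (String × List Int)) : List Int :=
  ((PySem.Dict.ofList d).get? "numbers").getD []

-- ===== PORT A =====
def markov_orthogonal_bet (history : List (List (String × List Int))) (exclude : Option (List Int)) (markov_window : Int) : List Int :=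
  let excl : List Int := match exclude with
    | some l => if l.isEmpty then [] else l
    | none => []
  let window : Int := min markov_window (PySem.List.len history)
  let recent : List (List (String × List Int)) := PySem.List.slice history (some (-window)) none
  let transitions : PySem.Dict (Int × Int) Int :=
    (PySem.List.pyRange 0 (PySem.List.len recent - 1) 1).foldl
      (fun t i =>
        let prev_nums := pvNums (PySem.List.pyGetD recent i [])
        let next_nums := pvNums (PySem.List.pyGetD recent (i + 1) [])
        prev_nums.foldl (fun t p => next_nums.foldl (fun t n => t.modify (p, n) 0 (· + 1)) t) t)
      PySem.Dict.empty
  if PySem.List.len history < 2 then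
    let candidates := (PySem.List.pyRange 1 50 1).filter (fun n => !excl.contains n)
    PySem.List.sorted (candidates.take 6) (fun x => x) false
  else
    let last_draw_nums := pvNums (PySem.List.pyGetD history (-1) [])
    let scores : PySem.Dict Int Int :=
      last_draw_nums.foldl
        (fun s prev_num =>
          (PySem.List.pyRange 1 50 1).foldl
            (fun s n => s.modify n 0 (· + transitions.getD (prev_num, n) 0)) s)
        PySem.Dict.empty
    let candidates := ((PySem.List.pyRange 1 50 1).filter (fun n => !excl.contains n)).map
      (fun n => (n, scores.getD n 0))
    let candidates := PySem.List.sorted candidates (fun x => -x.2) false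
    let selected := (candidates.take 6).map (fun p => p.1)
    let selected :=
      if selected.length < 6 then
        let remaining := (PySem.List.pyRange 1 50 1).filter
          (fun n => !excl.contains n && !selected.contains n)
        selected ++ remaining.take (6 - selected.length)
      else selected
    PySem.List.sorted (selected.take 6) (fun x => x) false

-- ===== PORT B =====
def markov_orthogonal_bet_alt (history : List (List (String × List Int))) (exclude : Option (List Int)) (markov_window : Int) : List Int :=
  let excl : List Int := match exclude with
    | some l => if l.isEmpty then [] else l
    | none => []
  if PySem.List.len history < 2 then
    let candidates := (PySem.List.pyRange 1 50 1).filter (fun n => !excl.contains n)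
    PySem.List.sorted (candidates.take 6) (fun x => x) false
  else
    let window : Int := min markov_window (PySem.List.len history)
    let recent : List (List (String × List Int)) := PySem.List.slice history (some (-window)) none
    let last_counts : PySem.Dict Int Int :=
      PySem.Dict.counter (pvNums (PySem.List.pyGetD history (-1) []))
    let scores : PySem.Dict Int Int :=
      (PySem.List.pyRange 0 (PySem.List.len recent - 1) 1).foldl
        (fun s i =>
          let overlap : Int :=
            ((pvNums (PySem.List.pyGetD recent i [])).map (fun p => last_counts.getD p 0)).sum
          (pvNums (PySem.List.pyGetD recent (i + 1) [])).foldl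
            (fun s n => s.modify n 0 (· + overlap)) s)
        PySem.Dict.empty
    let candidates := ((PySem.List.pyRange 1 50 1).filter (fun n => !excl.contains n)).map
      (fun n => (n, scores.getD n 0))
    let candidates := PySem.List.sorted candidates (fun x => -x.2) false
    let selected := (candidates.take 6).map (fun p => p.1)
    let selected :=
      if selected.length < 6 then
        let remaining := (PySem.List.pyRange 1 50 1).filter
          (fun n => !excl.contains n && !selected.contains n)
        selected ++ remaining.take (6 - selected.length)
      else selected
    PySem.List.sorted (selected.take 6) (fun x => x) false

-- ===== PRECONDITION & SPEC =====
-- Pre_ excludes exactly the inputs where Python A raises KeyError: a draw the function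
-- actually reads (the consecutive recent-window draws, and the last draw) lacks a "numbers" key.
def Pre_markov_orthogonal_bet (history : List (List (String × List Int))) (exclude : Option (List Int)) (markov_window : Int) : Prop :=
  (2 ≤ (PySem.List.slice history (some (-(min markov_window (PySem.List.len history)))) none).length →
    ∀ d ∈ PySem.List.slice history (some (-(min markov_window (PySem.List.len history)))) none,
      ((PySem.Dict.ofList d).get? "numbers").isSome = true) ∧
  (2 ≤ history.length →
    (history.getLast?.all (fun d => ((PySem.Dict.ofList d).get? "numbers").isSome)) = true)
instance (history : List (List (String × List Int))) (exclude : Option (List Int)) (markov_window : Int) : Decidable (Pre_markov_orthogonal_bet history exclude markov_window) := by unfold Pre_markov_orthogonal_bet; infer_instance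

def pvWitness_markov_orthogonal_bet : (List (List (String × List Int))) × Option (List Int) × Int :=
  ([[("numbers", [1, 2, 3])], [("numbers", [2, 3, 4])]], none, 30)

def Spec_markov_orthogonal_bet (history : List (List (String × List Int))) (exclude : Option (List Int)) (markov_window : Int) (out : List Int) : Prop := out = markov_orthogonal_bet_alt history exclude markov_window
instance (history : List (List (String × List Int))) (exclude : Option (List Int)) (markov_window : Int) (out : List Int) : Decidable (Spec_markov_orthogonal_bet history exclude markov_window out) := by unfold Spec_markov_orthogonal_bet; infer_instance

-- ===== CLAIM (what is proved, stated in full; the proofs are below) =====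
def Claim_equal_markov_orthogonal_bet : Prop := ∀ (history : List (List (String × List Int))) (exclude : Option (List Int)) (markov_window : Int), Dom_markov_orthogonal_bet history exclude markov_window → Pre_markov_orthogonal_bet history exclude markov_window → Spec_markov_orthogonal_bet history exclude markov_window (markov_orthogonal_bet history exclude markov_window)

-- ===== LEMMAS AND PROOFS =====

theorem pv_countAdd (l : List Int) (s : PySem.Dict Int Int) (c n : Int) :
    (l.foldl (fun s x => s.modify x 0 (· + c)) s).getD n 0
      = s.getD n 0 + c * (l.count n : Int) := by
  induction l generalizing s with
  | nil => simp
  | cons x xs ih =>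
    simp only [List.foldl_cons, ih, PySem.Dict.getD_modify, List.count_cons]
    by_cases h : n = x
    · simp [h]; ring
    · simp [h, Ne.symm h]

theorem pv_modifyList_not_mem (ks : List Int) (f : Int → Int) (s : PySem.Dict Int Int) (n : Int)
    (hn : n ∉ ks) :
    (ks.foldl (fun s k => s.modify k 0 (· + f k)) s).getD n 0 = s.getD n 0 := by
  induction ks generalizing s with
  | nil => simp
  | cons k ks ih =>
    simp only [List.mem_cons, not_or] at hn
    simp only [List.foldl_cons, ih _ hn.2, PySem.Dict.getD_modify, if_neg hn.1]

theorem pv_modifyList_mem (ks : List Int) (f : Int → Int) (s : PySem.Dict Int Int) (n : Int)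
    (hnd : ks.Nodup) (hn : n ∈ ks) :
    (ks.foldl (fun s k => s.modify k 0 (· + f k)) s).getD n 0 = s.getD n 0 + f n := by
  induction ks generalizing s with
  | nil => simp at hn
  | cons k ks ih =>
    simp only [List.nodup_cons] at hnd
    simp only [List.foldl_cons]
    rcases List.mem_cons.1 hn with h | h
    · subst h
      rw [pv_modifyList_not_mem ks f _ n hnd.1, PySem.Dict.getD_modify_self]
    · have hne : n ≠ k := fun he => hnd.1 (he ▸ h)
      rw [ih _ hnd.2 h, PySem.Dict.getD_modify, if_neg hne]

theorem pv_innerAdd (next : List Int) (t : PySem.Dict (Int × Int) Int) (p' p n : Int) :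
    (next.foldl (fun t n' => t.modify (p', n') 0 (· + 1)) t).getD (p, n) 0
      = t.getD (p, n) 0 + (if p' = p then (next.count n : Int) else 0) := by
  induction next generalizing t with
  | nil => simp
  | cons x xs ih =>
    simp only [List.foldl_cons, ih, PySem.Dict.getD_modify, List.count_cons, beq_iff_eq,
      Prod.mk.injEq]
    by_cases hp : p' = p
    · subst hp
      by_cases hx : n = x
      · subst hx; simp; ring
      · simp [hx]
        exact fun h => hx h.symm
    · simp [hp]
      exact fun h1 _ => absurd h1.symm hp

theorem pv_pairAdd (prev next : List Int) (t : PySem.Dict (Int × Int) Int) (p n : Int) :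
    (prev.foldl (fun t p' => next.foldl (fun t n' => t.modify (p', n') 0 (· + 1)) t) t).getD (p, n) 0
      = t.getD (p, n) 0 + (prev.count p : Int) * (next.count n : Int) := by
  induction prev generalizing t with
  | nil => simp
  | cons p' prev ih =>
    simp only [List.foldl_cons, ih, pv_innerAdd, List.count_cons, beq_iff_eq]
    by_cases h : p = p'
    · subst h; simp; ring
    · simp only [if_neg (fun he : p' = p => h he.symm)]; push_cast; ring

theorem pv_trans_getD (pv nx : Nat → List Int) (M : Nat) (p n : Int) :
    (((List.range M).foldl
        (fun t k => (pv k).foldl (fun t p' => (nx k).foldl (fun t n' => t.modify (p', n') 0 (· + 1)) t) t)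
        PySem.Dict.empty : PySem.Dict (Int × Int) Int)).getD (p, n) 0
      = ((List.range M).map (fun k => ((pv k).count p : Int) * ((nx k).count n : Int))).sum := by
  induction M with
  | zero => simp
  | succ m ih =>
    rw [List.range_succ, List.foldl_append, List.map_append, List.sum_append,
      List.foldl_cons, List.foldl_nil, pv_pairAdd, ih]
    simp

theorem pv_scoresA_getD (last : List Int) (g : Int → Int → Int) (s : PySem.Dict Int Int) (n : Int)
    (hn : n ∈ PySem.List.pyRange 1 50 1) :
    (last.foldl
        (fun s prev => (PySem.List.pyRange 1 50 1).foldl (fun s k => s.modify k 0 (· + g prev k)) s)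
        s).getD n 0
      = s.getD n 0 + (last.map (fun prev => g prev n)).sum := by
  induction last generalizing s with
  | nil => simp
  | cons prev last ih =>
    rw [List.foldl_cons, ih, pv_modifyList_mem _ _ _ _ (PySem.List.nodup_pyRange_one 1 50) hn]
    simp [add_assoc]

theorem pv_scoresB_getD (nx : Nat → List Int) (ov : Nat → Int) (M : Nat) (n : Int) :
    (((List.range M).foldl
        (fun s k => (nx k).foldl (fun s x => s.modify x 0 (· + ov k)) s)
        PySem.Dict.empty : PySem.Dict Int Int)).getD n 0
      = ((List.range M).map (fun k => ov k * ((nx k).count n : Int))).sum := by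
  induction M with
  | zero => simp
  | succ m ih =>
    rw [List.range_succ, List.foldl_append, List.map_append, List.sum_append,
      List.foldl_cons, List.foldl_nil, pv_countAdd, ih]
    simp

theorem pv_sum_count_comm (A B : List Int) :
    (A.map (fun a => (B.count a : Int))).sum = (B.map (fun b => (A.count b : Int))).sum := by
  induction A with
  | nil => simp
  | cons a A ih =>
    simp only [List.map_cons, List.sum_cons, ih, List.count_cons]
    have h1 : (B.map fun b => ((List.count b A + if (a == b) then 1 else 0 : Nat) : Int)).sum
        = (B.map fun b => ((List.count b A : Nat) : Int)).sum
          + (B.map fun b => if (b == a : Bool) then (1 : Int) else 0).sum := by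
      rw [← PySem.List.sum_map_add_int]
      apply congrArg
      apply List.map_congr_left
      intro b _
      by_cases h : b = a
      · subst h; simp
      · simp [h]
        exact fun hh => h hh.symm
    rw [h1, PySem.List.sum_map_ite_one_zero]
    rw [show List.countP (fun b => b == a) B = List.count a B from rfl]
    omega

theorem pv_sum_swap_factor (A : List Int) (M : Nat) (u : Nat → Int → Int) (v : Nat → Int) :
    (A.map (fun a => ((List.range M).map (fun k => u k a * v k)).sum)).sum
      = ((List.range M).map (fun k => (A.map (fun a => u k a)).sum * v k)).sum := by
  induction M with
  | zero => simp
  | succ m ih =>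
    rw [List.range_succ]
    simp only [List.map_append, List.sum_append, List.map_singleton, List.sum_singleton]
    rw [← ih]
    have : (A.map (fun a => ((List.range m).map (fun k => u k a * v k)).sum + u m a * v m)).sum
        = (A.map (fun a => ((List.range m).map (fun k => u k a * v k)).sum)).sum
          + (A.map (fun a => u m a * v m)).sum := by
      rw [← PySem.List.sum_map_add_int]
    rw [this, List.sum_map_mul_right]


theorem pv_pyRange_foldl {α : Type} (M' : Int) (f : α → Int → α) (init : α) :
    (PySem.List.pyRange 0 M' 1).foldl f init
      = (List.range M'.toNat).foldl (fun a (k : Nat) => f a (k : Int)) init := by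
  rw [PySem.List.pyRange_one, List.foldl_map]
  simp only [zero_add, Int.sub_zero]

theorem pv_scores_eq (recent : List (List (String × List Int))) (last : List Int) (n : Int)
    (hn : n ∈ PySem.List.pyRange 1 50 1) :
    (last.foldl
        (fun s prev_num =>
          (PySem.List.pyRange 1 50 1).foldl
            (fun s k => s.modify k 0
              (· + ((PySem.List.pyRange 0 (PySem.List.len recent - 1) 1).foldl
                      (fun t i =>
                        (pvNums (PySem.List.pyGetD recent i [])).foldl
                          (fun t p => (pvNums (PySem.List.pyGetD recent (i + 1) [])).foldl
                            (fun t n' => t.modify (p, n') 0 (· + 1)) t) t)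
                      PySem.Dict.empty).getD (prev_num, k) 0)) s)
        PySem.Dict.empty).getD n 0
      = ((PySem.List.pyRange 0 (PySem.List.len recent - 1) 1).foldl
          (fun s i =>
            (pvNums (PySem.List.pyGetD recent (i + 1) [])).foldl
              (fun s x => s.modify x 0
                (· + ((pvNums (PySem.List.pyGetD recent i [])).map
                        (fun p => (PySem.Dict.counter last).getD p 0)).sum)) s)
          PySem.Dict.empty).getD n 0 := by
  simp only [pv_pyRange_foldl]
  simp only [pv_trans_getD, pv_scoresB_getD]
  rw [pv_scoresA_getD _ _ _ _ hn]
  rw [pv_sum_swap_factor]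
  simp only [PySem.Dict.getD_empty, zero_add]
  apply congrArg
  apply List.map_congr_left
  intro k _
  congr 1
  rw [pv_sum_count_comm]
  apply congrArg
  apply List.map_congr_left
  intro p _
  rw [PySem.Dict.getD_counter]

theorem pv_cand_eq (recent : List (List (String × List Int))) (last : List Int) (q : Int → Bool) :
    ((PySem.List.pyRange 1 50 1).filter q).map
        (fun n => (n,
          (last.foldl
            (fun s prev_num =>
              (PySem.List.pyRange 1 50 1).foldl
                (fun s k => s.modify k 0
                  (· + ((PySem.List.pyRange 0 (PySem.List.len recent - 1) 1).foldl
                          (fun t i =>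
                            (pvNums (PySem.List.pyGetD recent i [])).foldl
                              (fun t p => (pvNums (PySem.List.pyGetD recent (i + 1) [])).foldl
                                (fun t n' => t.modify (p, n') 0 (· + 1)) t) t)
                          PySem.Dict.empty).getD (prev_num, k) 0)) s)
            PySem.Dict.empty).getD n 0))
      = ((PySem.List.pyRange 1 50 1).filter q).map
        (fun n => (n,
          ((PySem.List.pyRange 0 (PySem.List.len recent - 1) 1).foldl
            (fun s i =>
              (pvNums (PySem.List.pyGetD recent (i + 1) [])).foldl
                (fun s x => s.modify x 0
                  (· + ((pvNums (PySem.List.pyGetD recent i [])).map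
                          (fun p => (PySem.Dict.counter last).getD p 0)).sum)) s)
            PySem.Dict.empty).getD n 0)) := by
  apply List.map_congr_left
  intro n hn
  exact congrArg (Prod.mk n) (pv_scores_eq recent last n (List.mem_filter.1 hn).1)

theorem pv_main (history : List (List (String × List Int))) (exclude : Option (List Int)) (markov_window : Int) :
    markov_orthogonal_bet history exclude markov_window
      = markov_orthogonal_bet_alt history exclude markov_window := by
  unfold markov_orthogonal_bet markov_orthogonal_bet_alt
  simp only []
  by_cases hlen : PySem.List.len history < 2
  · rw [if_pos hlen, if_pos hlen]
  · rw [if_neg hlen, if_neg hlen, pv_cand_eq]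

-- ===== VERDICT (by name: the statement is the Claim_ definition above) =====
theorem markov_orthogonal_bet_spec : Claim_equal_markov_orthogonal_bet := by
  intro history exclude markov_window _hd _hp
  exact pv_main history exclude markov_window
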